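-- pv_equiv track=rewrite | github.com/liltmagicbox/3dkatsu | objects/assetobject/material.py | get_namekey
-- ===== SOURCE A (Python) =====
-- def get_namekey(namedict, name):
-- 	if name in namedict:
-- 		baridx = name.rfind('_')
-- 		if baridx == -1:
-- 			name = name+'_0'
-- 			name = get_namekey(namedict,name)
-- 		else:
-- 			front = name[:baridx]
-- 			back = name[baridx+1:]
-- 			if back.isdecimal():#digit 3^3, numeric 3.3E06
-- 				i = int(back)+1
-- 				name = f"{front}_{i}"
-- 				name = get_namekey(namedict,name)
-- 			else:
-- 				name = name+'_0'
-- 				name = get_namekey(namedict,name)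
-- 	return name
-- ===== SOURCE B (Python) =====
-- def _next_name(name):
--     front, sep, back = name.rpartition('_')
--     if sep and back.isdecimal():
--         return f"{front}_{int(back) + 1}"
--     return name + '_0'
--
-- def get_namekey(namedict, name):
--     while name in namedict:
--         name = _next_name(name)
--     return name
-- ===== Notes on version B (the rewrite author's own statement) =====
-- stated objective: idiomatic
-- what changed: Replaced the tail recursion and three-way nested rfind/slice branching by an iterative while loop over a separate _next_name helper that uses str.rpartition and one merged condition (sep and back.isdecimal()).
import Mathlib
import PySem

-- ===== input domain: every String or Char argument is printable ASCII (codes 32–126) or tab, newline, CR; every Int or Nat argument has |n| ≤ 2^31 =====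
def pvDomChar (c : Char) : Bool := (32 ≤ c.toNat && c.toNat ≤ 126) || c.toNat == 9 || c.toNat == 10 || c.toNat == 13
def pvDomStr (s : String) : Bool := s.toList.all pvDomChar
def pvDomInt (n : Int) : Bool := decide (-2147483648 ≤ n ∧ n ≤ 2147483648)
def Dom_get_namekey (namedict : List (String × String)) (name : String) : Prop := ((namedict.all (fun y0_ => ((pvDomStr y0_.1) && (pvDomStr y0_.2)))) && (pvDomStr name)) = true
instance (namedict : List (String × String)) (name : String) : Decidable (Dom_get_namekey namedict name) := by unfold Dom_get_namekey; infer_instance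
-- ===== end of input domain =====

-- B replaces A's tail recursion and duplicated rfind/slice branches by a while loop over a
-- _next_name helper built on str.rpartition with one merged condition (idiomatic; same values).

-- ===== PORT A =====
-- A's recursion terminates because each probe is a distinct dict key; fuel namedict.length + 1
-- bounds the number of membership-true steps, so the guard only makes the recursion total.
-- `back.isdecimal()` is ported as PySem.Str.strIsdigit: on the ASCII domain isdecimal = isdigit.
-- `int(back)` is ported as (PySem.Int.ofStr? back).getD 0: strIsdigit back guarantees ofStr?
-- returns some, so the getD 0 default is never used (exact).
def get_namekeyGo (namedict : List (String × String)) : Nat → String → String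
  | 0, name => name
  | fuel + 1, name =>
    if (PySem.Dict.mk namedict).contains name then
      let baridx := PySem.Str.rfind name "_"
      if baridx = -1 then
        get_namekeyGo namedict fuel (name ++ "_0")
      else
        let front := PySem.Str.slice name none (some baridx)
        let back := PySem.Str.slice name (some (baridx + 1)) none
        if PySem.Str.strIsdigit back then
          let i := (PySem.Int.ofStr? back).getD 0 + 1
          get_namekeyGo namedict fuel (front ++ "_" ++ PySem.Int.toStr i)
        else
          get_namekeyGo namedict fuel (name ++ "_0")
    else name

def get_namekey (namedict : List (String × String)) (name : String) : String :=
  get_namekeyGo namedict (namedict.length + 1) name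

-- ===== PORT B =====
-- Hand port of Python's str.rpartition(sep) (no PySem primitive): exact for nonempty sep,
-- and B only calls it with sep = "_".
def rpartitionB (s sep : String) : String × String × String :=
  let i := PySem.Str.rfind s sep
  if i = -1 then ("", "", s)
  else (PySem.Str.slice s none (some i), sep, PySem.Str.slice s (some (i + PySem.Str.len sep)) none)

-- port of _next_name (isdecimal/int ported exactly as in port A, see comment there)
def nextNameB (name : String) : String :=
  let p := rpartitionB name "_"
  if p.2.1 != "" && PySem.Str.strIsdigit p.2.2 then
    p.1 ++ "_" ++ PySem.Int.toStr ((PySem.Int.ofStr? p.2.2).getD 0 + 1)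
  else name ++ "_0"

-- the while loop, made total by the same fuel bound as port A
def get_namekeyAltGo (namedict : List (String × String)) : Nat → String → String
  | 0, name => name
  | fuel + 1, name =>
    if (PySem.Dict.mk namedict).contains name then
      get_namekeyAltGo namedict fuel (nextNameB name)
    else name

def get_namekey_alt (namedict : List (String × String)) (name : String) : String :=
  get_namekeyAltGo namedict (namedict.length + 1) name

-- ===== PRECONDITION & SPEC =====
def Spec_get_namekey (namedict : List (String × String)) (name : String) (out : String) : Prop := out = get_namekey_alt namedict name
instance (namedict : List (String × String)) (name : String) (out : String) : Decidable (Spec_get_namekey namedict name out) := by unfold Spec_get_namekey; infer_instance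

-- ===== CLAIM (what is proved, stated in full; the proofs are below) =====
def Claim_equal_get_namekey : Prop := ∀ (namedict : List (String × String)) (name : String), Dom_get_namekey namedict name → Spec_get_namekey namedict name (get_namekey namedict name)

-- ===== LEMMAS AND PROOFS =====

-- A's three branches compute exactly _next_name's two branches.
theorem nextNameB_eq_step (name : String) :
    nextNameB name =
      (let baridx := PySem.Str.rfind name "_"
       if baridx = -1 then name ++ "_0"
       else
         let front := PySem.Str.slice name none (some baridx)
         let back := PySem.Str.slice name (some (baridx + 1)) none
         if PySem.Str.strIsdigit back then
           front ++ "_" ++ PySem.Int.toStr ((PySem.Int.ofStr? back).getD 0 + 1)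
         else name ++ "_0") := by
  unfold nextNameB rpartitionB
  simp only [PySem.Str.rfind_eq]
  by_cases h : PySem.Chars.rfind name.toList ['_'] = -1
  · simp [h]
  · simp [h]

theorem go_eq (namedict : List (String × String)) :
    ∀ (fuel : Nat) (name : String),
      get_namekeyGo namedict fuel name = get_namekeyAltGo namedict fuel name := by
  intro fuel
  induction fuel with
  | zero => intro name; rfl
  | succ f ih =>
    intro name
    rw [get_namekeyGo, get_namekeyAltGo]
    by_cases hc : (PySem.Dict.mk namedict).contains name
    · simp only [hc, if_true, nextNameB_eq_step]
      by_cases h : PySem.Str.rfind name "_" = -1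
      · simp only [h, if_true, ih]
      · by_cases hd : PySem.Str.strIsdigit
            (PySem.Str.slice name (some (PySem.Str.rfind name "_" + 1)) none)
        · simp only [h, hd, if_false, if_true, ih]
        · simp only [h, hd, if_false, ih]
          simp
    · simp [hc]

-- ===== VERDICT (by name: the statement is the Claim_ definition above) =====
theorem get_namekey_spec : Claim_equal_get_namekey := by
  intro namedict name _
  unfold Spec_get_namekey get_namekey get_namekey_alt
  exact go_eq namedict (namedict.length + 1) name
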